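-- pv_equiv track=rewrite | github.com/YoungChanShin/codingtest | programmers/2022_KAKAO/04/one.py | solution
-- ===== SOURCE A (Python) =====
-- def getSubset():
--     res = []
--
--     def dfs(start=10, arr=[]):
--         res.append(arr)
--
--         for i in range(start,-1,-1):
--             dfs(i - 1, arr+[i])
--
--     dfs()
--     return res
--
-- def isPosible(c, info, n):
--     sum = 0
--     for i in c:
--         sum += info[i]+1
--     return True if sum <= n else False
--
-- def calcScore(c, info):
--     s = 0
--     for i in range(11):
--         if i in c:
--             s += 10-i
--         elif info[i] != 0:
--             s -= 10-i
--     return s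
--
-- def solution(n, info):
--     answer = []
--     candidates = getSubset()
--     max_val = -1
--     for c in candidates:
--         if isPosible(c, info, n):
--             s = calcScore(c, info)
--             if s > max_val:
--                 max_val = s
--                 answer = c
--
--     if len(answer) == 0 or max_val == 0:
--         return [-1]
--     res = [info[s]+1 if s in answer else 0 for s in range(11)]
--     if sum(res)< n:
--         res[-1] += n-sum(res)
--     return res
-- ===== SOURCE B (Python) =====
-- def solution(n, info):
--     # Brute force over bitmasks: bit i set = Lion claims target i with info[i]+1 arrows.
--     # Masks are tried from 2047 down so that, among equal margins, the selection
--     # hitting the lower-scoring (higher-index) targets is kept, as the problem asks.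
--     best = None  # (margin, mask) of the best strictly-winning selection so far
--     for mask in range(2047, -1, -1):
--         cost = 0
--         margin = 0
--         for i in range(11):
--             if mask >> i & 1:
--                 cost += info[i] + 1
--                 margin += 10 - i
--             elif info[i]:
--                 margin -= 10 - i
--         if cost <= n and margin > (best[0] if best else 0):
--             best = (margin, mask)
--     if best is None:
--         return [-1]
--     res = [info[i] + 1 if best[1] >> i & 1 else 0 for i in range(11)]
--     res[10] += n - sum(res)  # spend any leftover arrows on the 1-point target
--     return res
-- ===== Notes on version B (the rewrite author's own statement) =====
-- stated objective: alternative
-- what changed: B replaces A's recursively pre-generated list of all 2048 ring-subset lists (each re-scanned by isPosible and by calcScore's 'i in c' membership tests) with a single arithmetic loop over bitmasks 2047..0 computing cost and margin per mask; Pre_ excludes info lists shorter than 11 entries, on which A raises IndexError.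
import Mathlib
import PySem

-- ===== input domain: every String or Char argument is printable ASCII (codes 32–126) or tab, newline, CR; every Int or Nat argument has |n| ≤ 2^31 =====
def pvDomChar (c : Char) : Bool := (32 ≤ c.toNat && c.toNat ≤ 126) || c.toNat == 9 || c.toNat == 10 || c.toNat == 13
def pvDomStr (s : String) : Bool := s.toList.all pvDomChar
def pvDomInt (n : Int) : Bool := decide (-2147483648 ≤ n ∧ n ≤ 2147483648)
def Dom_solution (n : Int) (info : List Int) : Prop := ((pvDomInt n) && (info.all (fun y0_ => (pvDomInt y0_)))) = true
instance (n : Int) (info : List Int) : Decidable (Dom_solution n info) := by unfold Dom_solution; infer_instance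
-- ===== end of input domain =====

-- B replaces A's pre-generated list of all ring-subset lists by a single
-- arithmetic scan over bitmasks 2047..0; objective: alternative.

-- ===== PORT A =====
-- Python's inner recursive dfs of getSubset.  The Nat fuel only makes the
-- recursion total: the call depth is bounded by 12 (start begins at 10 and
-- strictly decreases to -1, where the range is empty), so fuel 12 never truncates.
def dfsA : Nat → Int → List Int → List (List Int)
  | 0, _, arr => [arr]
  | f + 1, start, arr =>
      arr :: (PySem.List.pyRange start (-1) (-1)).flatMap (fun i => dfsA f (i - 1) (arr ++ [i]))

def getSubsetA : List (List Int) := dfsA 12 10 []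

-- info[i] is ported as (pyGet? info i).getD 0: under Pre_solution (11 ≤ len info)
-- every access 0 ≤ i ≤ 10 is in range, so the default is never taken (exact there).
def isPosibleA (c : List Int) (info : List Int) (n : Int) : Bool :=
  decide ((c.foldl (fun sum i => sum + ((PySem.List.pyGet? info i).getD 0 + 1)) 0) ≤ n)

def calcScoreA (c : List Int) (info : List Int) : Int :=
  (PySem.List.pyRange 0 11 1).foldl
    (fun s i =>
      if c.contains i then s + (10 - i)
      else if (PySem.List.pyGet? info i).getD 0 ≠ 0 then s - (10 - i)
      else s) 0

def solution (n : Int) (info : List Int) : List Int :=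
  let p := getSubsetA.foldl
    (fun (st : List Int × Int) c =>
      if isPosibleA c info n then
        let s := calcScoreA c info
        if s > st.2 then (c, s) else st
      else st) ([], -1)
  if p.1.length = 0 ∨ p.2 = 0 then [-1]
  else
    -- res[-1] += n - sum(res): res has 11 elements, so this is exactly
    -- dropLast ++ [last + (n - sum)].
    let res := (PySem.List.pyRange 0 11 1).map
      (fun s => if p.1.contains s then (PySem.List.pyGet? info s).getD 0 + 1 else 0)
    if res.sum < n then res.dropLast ++ [res.getLastD 0 + (n - res.sum)] else res

-- ===== PORT B =====
-- the inner `for i in range(11)` loop of Source B with state (cost, margin).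
-- Python's `mask >> i & 1` is ported as floordiv by 2^i mod 2: exact here since
-- every mask in range(2047, -1, -1) and every i in range(11) is nonnegative.
def innerB (info : List Int) (mask : Int) : Int × Int :=
  (PySem.List.pyRange 0 11 1).foldl
    (fun (t : Int × Int) i =>
      if PySem.Int.mod (PySem.Int.floordiv mask (2 ^ i.toNat)) 2 = 1 then
        (t.1 + ((PySem.List.pyGet? info i).getD 0 + 1), t.2 + (10 - i))
      else if (PySem.List.pyGet? info i).getD 0 ≠ 0 then (t.1, t.2 - (10 - i))
      else t) (0, 0)

-- the body of Source B's `for mask in range(2047, -1, -1)` loop;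
-- `margin > (best[0] if best else 0)` is the match on the optional best.
def stepB (n : Int) (info : List Int) (best : Option (Int × Int)) (mask : Int) :
    Option (Int × Int) :=
  let t := innerB info mask
  if t.1 ≤ n ∧ t.2 > (match best with | some b => b.1 | none => 0) then some (t.2, mask)
  else best

def solution_alt (n : Int) (info : List Int) : List Int :=
  match (PySem.List.pyRange 2047 (-1) (-1)).foldl (stepB n info) none with
  | none => [-1]
  | some b =>
    let res := (PySem.List.pyRange 0 11 1).map
      (fun i => if PySem.Int.mod (PySem.Int.floordiv b.2 (2 ^ i.toNat)) 2 = 1 then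
          (PySem.List.pyGet? info i).getD 0 + 1 else 0)
    -- res[10] += n - sum(res): res has 11 elements, so index 10 is the last
    res.dropLast ++ [res.getLastD 0 + (n - res.sum)]

-- ===== PRECONDITION & SPEC =====
-- Pre_solution excludes exactly the inputs where the Python A raises IndexError:
-- it reads info[0]..info[10], so lists shorter than 11 crash (and so does Source B).
def Pre_solution (n : Int) (info : List Int) : Prop := 11 ≤ info.length
instance (n : Int) (info : List Int) : Decidable (Pre_solution n info) := by
  unfold Pre_solution; infer_instance

def pvWitness_solution : Int × List Int := (5, [2, 3, 0, 1, 0, 0, 0, 0, 0, 0, 0])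

def Spec_solution (n : Int) (info : List Int) (out : List Int) : Prop := out = solution_alt n info
instance (n : Int) (info : List Int) (out : List Int) : Decidable (Spec_solution n info out) := by
  unfold Spec_solution; infer_instance

-- ===== CLAIM (what is proved, stated in full; the proofs are below) =====
def Claim_equal_solution : Prop := ∀ (n : Int) (info : List Int), Dom_solution n info →
  Pre_solution n info → Spec_solution n info (solution n info)

-- ===== LEMMAS AND PROOFS =====


-- proof-side abbreviations
def l1r : List Int := PySem.List.pyRange 0 11 1            -- [0,…,10]
def l0r : List Int := PySem.List.pyRange 10 (-1) (-1)      -- [10,…,0]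
def mlist : List Int := PySem.List.pyRange 2047 (-1) (-1)  -- [2047,…,0]
def bitP (m i : Int) : Bool := decide (PySem.Int.mod (PySem.Int.floordiv m (2 ^ i.toNat)) 2 = 1)
def csList (m : Int) : List Int := l0r.filter (bitP m)
def maskOf (c : List Int) : Int := c.foldl (fun a i => a + 2 ^ i.toNat) 0

-- lexA c1 c2 = true: c1 is enumerated strictly before c2 by A's dfs
def lexA : List Int → List Int → Bool
  | _, [] => false
  | [], _ :: _ => true
  | a :: t1, b :: t2 => decide (b < a) || (a == b && lexA t1 t2)

-- strictly descending list with entries in 0..10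
def descOK : List Int → Bool
  | [] => true
  | [a] => decide (0 ≤ a) && decide (a ≤ 10)
  | a :: b :: t => decide (0 ≤ a) && decide (a ≤ 10) && decide (b < a) && descOK (b :: t)

def chainDesc : List Int → Bool
  | a :: b :: t => decide (b < a) && chainDesc (b :: t)
  | _ => true

def chainLex : List (List Int) → Bool
  | a :: b :: t => lexA a b && chainLex (b :: t)
  | _ => true

def costM (info : List Int) (m : Int) : Int :=
  ((l1r.filter (bitP m)).map (fun i => (PySem.List.pyGet? info i).getD 0 + 1)).sum
def termS (info : List Int) (m i : Int) : Int :=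
  if bitP m i then 10 - i else if (PySem.List.pyGet? info i).getD 0 ≠ 0 then -(10 - i) else 0
def scoreM (info : List Int) (m : Int) : Int := (l1r.map (termS info m)).sum
def fC (c : List Int) (info : List Int) (i : Int) : Int :=
  if c.contains i then 10 - i else if (PySem.List.pyGet? info i).getD 0 ≠ 0 then -(10 - i) else 0

-- the best candidate so far in A's fold, rightmost-biased, ordered by (score, lexA)
def bestR (n : Int) (info : List Int) : List (List Int) → Option (List Int)
  | [] => none
  | c :: t =>
    match bestR n info t with
    | none => if isPosibleA c info n then some c else none
    | some b =>
      if isPosibleA c info n ∧ (calcScoreA c info > calcScoreA b info ∨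
          (calcScoreA c info = calcScoreA b info ∧ lexA c b = true)) then some c
      else some b

-- the best feasible mask so far in B's fold, ordered by (score, mask)
def bestM (n : Int) (info : List Int) : List Int → Option Int
  | [] => none
  | m :: t =>
    match bestM n info t with
    | none => if costM info m ≤ n then some m else none
    | some b =>
      if costM info m ≤ n ∧ (scoreM info m > scoreM info b ∨
          (scoreM info m = scoreM info b ∧ m > b)) then some m
      else some b

def thr : Option (Int × Int) → Int
  | some b => b.1
  | none => 0

-- ---- closed facts, checked by kernel computation ----
set_option maxRecDepth 100000 in
set_option maxHeartbeats 4000000 in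
theorem F_lexchain : chainLex getSubsetA = true := by decide

set_option maxRecDepth 100000 in
set_option maxHeartbeats 4000000 in
theorem F_desc : getSubsetA.all descOK = true := by decide

set_option maxRecDepth 100000 in
set_option maxHeartbeats 4000000 in
theorem F_csmask :
    getSubsetA.all
      (fun c => csList (maskOf c) == c && (decide (0 ≤ maskOf c) && decide (maskOf c < 2048))) = true := by decide


set_option maxRecDepth 100000 in
theorem F_len : getSubsetA.length = 2048 := by decide

set_option maxRecDepth 100000 in
set_option maxHeartbeats 4000000 in
theorem F_maskcs : (PySem.List.pyRange 0 2048 1).all (fun m => maskOf (csList m) == m) = true := by decide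


set_option maxRecDepth 100000 in
set_option maxHeartbeats 4000000 in
theorem F_mrev : mlist = (PySem.List.pyRange 0 2048 1).reverse := by decide

set_option maxRecDepth 100000 in
set_option maxHeartbeats 4000000 in
theorem F_mchain : chainDesc mlist = true := by decide

theorem l0r_eq_rev : l0r = l1r.reverse := by decide

-- ---- lexA basics ----
theorem lexA_trans : ∀ l1 l2 l3 : List Int,
    lexA l1 l2 = true → lexA l2 l3 = true → lexA l1 l3 = true := by
  intro l1
  induction l1 with
  | nil =>
    intro l2 l3 h12 h23
    cases l2 with
    | nil => simp [lexA] at h12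
    | cons b t2 =>
      cases l3 with
      | nil => simp [lexA] at h23
      | cons c t3 => simp [lexA]
  | cons a t1 ih =>
    intro l2 l3 h12 h23
    cases l2 with
    | nil => simp [lexA] at h12
    | cons b t2 =>
      cases l3 with
      | nil => simp [lexA] at h23
      | cons c t3 =>
        simp only [lexA, Bool.or_eq_true, Bool.and_eq_true, decide_eq_true_eq,
          beq_iff_eq] at h12 h23 ⊢
        rcases h12 with h1 | ⟨hab, h1⟩ <;> rcases h23 with h2 | ⟨hbc, h2⟩
        · exact Or.inl (by omega)
        · exact Or.inl (by omega)
        · exact Or.inl (by omega)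
        · exact Or.inr ⟨by omega, ih t2 t3 h1 h2⟩

theorem lexA_irrefl : ∀ l : List Int, lexA l l = false := by
  intro l
  induction l with
  | nil => rfl
  | cons a t ih => simp [lexA, ih]

theorem chainLex_pairwise : ∀ l : List (List Int), chainLex l = true →
    l.Pairwise (fun a b => lexA a b = true) := by
  intro l
  induction l with
  | nil => intro _; exact List.Pairwise.nil
  | cons a t ih =>
    cases t with
    | nil => intro _; exact List.pairwise_singleton _ _
    | cons b t2 =>
      intro h
      simp only [chainLex, Bool.and_eq_true] at h
      obtain ⟨hab, hc⟩ := h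
      have hp := ih hc
      refine List.Pairwise.cons ?_ hp
      intro x hx
      rcases List.mem_cons.mp hx with rfl | hx2
      · exact hab
      · exact lexA_trans _ _ _ hab ((List.pairwise_cons.mp hp).1 x hx2)

theorem chainDesc_pairwise : ∀ l : List Int, chainDesc l = true → l.Pairwise (· > ·) := by
  intro l
  induction l with
  | nil => intro _; exact List.Pairwise.nil
  | cons a t ih =>
    cases t with
    | nil => intro _; exact List.pairwise_singleton _ _
    | cons b t2 =>
      intro h
      simp only [chainDesc, Bool.and_eq_true, decide_eq_true_eq] at h
      obtain ⟨hab, hc⟩ := h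
      have hp := ih hc
      refine List.Pairwise.cons ?_ hp
      intro x hx
      rcases List.mem_cons.mp hx with rfl | hx2
      · exact hab
      · have := (List.pairwise_cons.mp hp).1 x hx2
        omega

theorem pairwise_lex_LA : getSubsetA.Pairwise (fun a b => lexA a b = true) :=
  chainLex_pairwise _ F_lexchain

theorem pairwise_gt_mlist : mlist.Pairwise (· > ·) :=
  chainDesc_pairwise _ F_mchain


-- ---- descOK structure ----
theorem descOK_tail : ∀ a (t : List Int), descOK (a :: t) = true →
    descOK t = true ∧ 0 ≤ a ∧ a ≤ 10 ∧ ∀ x ∈ t, x < a := by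
  intro a t
  induction t generalizing a with
  | nil =>
    intro h
    simp only [descOK, Bool.and_eq_true, decide_eq_true_eq] at h
    exact ⟨rfl, h.1, h.2, by intro x hx; simp at hx⟩
  | cons b t2 ih =>
    intro h
    simp only [descOK, Bool.and_eq_true, decide_eq_true_eq] at h
    obtain ⟨⟨⟨h0, h10⟩, hba⟩, hrest⟩ := h
    have hrest' : descOK (b :: t2) = true := by
      simpa [descOK, Bool.and_eq_true, decide_eq_true_eq] using hrest
    obtain ⟨_, _, _, hmem⟩ := ih b hrest'
    refine ⟨hrest', h0, h10, ?_⟩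
    intro x hx
    rcases List.mem_cons.mp hx with rfl | hx2
    · exact hba
    · have := hmem x hx2; omega

theorem descOK_bounds : ∀ c : List Int, descOK c = true → ∀ x ∈ c, 0 ≤ x ∧ x ≤ 10 := by
  intro c
  induction c with
  | nil => intro _ x hx; simp at hx
  | cons a t ih =>
    intro h x hx
    obtain ⟨ht, h0, h10, hmem⟩ := descOK_tail a t h
    rcases List.mem_cons.mp hx with rfl | hx2
    · exact ⟨h0, h10⟩
    · exact ih ht x hx2

theorem descOK_pairwise : ∀ c : List Int, descOK c = true → c.Pairwise (· > ·) := by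
  intro c
  induction c with
  | nil => intro _; exact List.Pairwise.nil
  | cons a t ih =>
    intro h
    obtain ⟨ht, _, _, hmem⟩ := descOK_tail a t h
    exact List.Pairwise.cons (fun x hx => hmem x hx) (ih ht)

-- ---- maskOf arithmetic ----
theorem foldl_add_map (f : Int → Int) : ∀ (l : List Int) (a : Int),
    l.foldl (fun s i => s + f i) a = a + (l.map f).sum := by
  intro l
  induction l with
  | nil => intro a; simp
  | cons i t ih => intro a; simp only [List.foldl_cons, List.map_cons, List.sum_cons, ih]; ring

theorem maskOf_eq_sum (c : List Int) : maskOf c = (c.map (fun i => (2 : Int) ^ i.toNat)).sum := by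
  unfold maskOf
  rw [foldl_add_map (fun i => (2 : Int) ^ i.toNat) c 0, zero_add]

theorem maskOf_cons (a : Int) (t : List Int) : maskOf (a :: t) = 2 ^ a.toNat + maskOf t := by
  rw [maskOf_eq_sum, maskOf_eq_sum, List.map_cons, List.sum_cons]

theorem sum_nonneg_list : ∀ l : List Int, (∀ x ∈ l, 0 ≤ x) → 0 ≤ l.sum := by
  intro l
  induction l with
  | nil => intro _; simp
  | cons y t ih =>
    intro h
    rw [List.sum_cons]
    have h1 := h y List.mem_cons_self
    have h2 := ih (fun x hx => h x (List.mem_cons_of_mem _ hx))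
    omega

theorem maskOf_nonneg (c : List Int) : 0 ≤ maskOf c := by
  rw [maskOf_eq_sum]
  apply sum_nonneg_list
  intro x hx
  obtain ⟨i, _, rfl⟩ := List.mem_map.mp hx
  positivity

theorem maskOf_lt_pow : ∀ c : List Int, descOK c = true → ∀ b : Int,
    (∀ x ∈ c, x < b) → maskOf c < 2 ^ b.toNat := by
  intro c
  induction c with
  | nil => intro _ b _; rw [maskOf_eq_sum]; simp
  | cons a t ih =>
    intro h b hb
    obtain ⟨ht, h0, _, hmem⟩ := descOK_tail a t h
    have hta : maskOf t < 2 ^ a.toNat := ih ht a hmem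
    have hab : a < b := hb a List.mem_cons_self
    have hnat : a.toNat + 1 ≤ b.toNat := by omega
    have hpow : (2 : Int) ^ (a.toNat + 1) ≤ 2 ^ b.toNat :=
      pow_le_pow_right₀ (by norm_num) hnat
    rw [maskOf_cons]
    have : (2 : Int) ^ (a.toNat + 1) = 2 ^ a.toNat + 2 ^ a.toNat := by ring
    omega

-- A's enumeration order agrees with descending-mask order except on set inclusions
theorem lexA_mask : ∀ c1 c2 : List Int, descOK c1 = true → descOK c2 = true →
    lexA c1 c2 = true → (∀ x ∈ c1, x ∈ c2) ∨ maskOf c2 < maskOf c1 := by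
  intro c1
  induction c1 with
  | nil => intro c2 _ _ _; exact Or.inl (by intro x hx; simp at hx)
  | cons a t1 ih =>
    intro c2 h1 h2 hlex
    cases c2 with
    | nil => simp [lexA] at hlex
    | cons b t2 =>
      obtain ⟨ht1, h0a, h10a, hmem1⟩ := descOK_tail a t1 h1
      obtain ⟨ht2, h0b, h10b, hmem2⟩ := descOK_tail b t2 h2
      simp only [lexA, Bool.or_eq_true, Bool.and_eq_true, decide_eq_true_eq, beq_iff_eq] at hlex
      rcases hlex with hba | ⟨hab, hlt⟩
      · refine Or.inr ?_
        have ht2b : maskOf t2 < 2 ^ b.toNat := maskOf_lt_pow t2 ht2 b hmem2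
        have hnn : 0 ≤ maskOf t1 := maskOf_nonneg t1
        have hnat : b.toNat + 1 ≤ a.toNat := by omega
        have hpow : (2 : Int) ^ (b.toNat + 1) ≤ 2 ^ a.toNat :=
          pow_le_pow_right₀ (by norm_num) hnat
        have hdbl : (2 : Int) ^ (b.toNat + 1) = 2 ^ b.toNat + 2 ^ b.toNat := by ring
        rw [maskOf_cons, maskOf_cons]
        omega
      · rcases ih t2 ht1 ht2 hlt with hsub | hm
        · refine Or.inl ?_
          intro x hx
          rcases List.mem_cons.mp hx with rfl | hx2
          · rw [hab]; exact List.mem_cons_self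
          · exact List.mem_cons_of_mem _ (hsub x hx2)
        · refine Or.inr ?_
          rw [maskOf_cons, maskOf_cons, hab]
          omega


-- ---- A-side fold characterization ----
theorem bestR_mem {n : Int} {info : List Int} :
    ∀ {l : List (List Int)} {b : List Int}, bestR n info l = some b → b ∈ l := by
  intro l
  induction l with
  | nil => intro b h; simp [bestR] at h
  | cons c t ih =>
    intro b h
    unfold bestR at h
    cases hb : bestR n info t with
    | none =>
      rw [hb] at h
      dsimp only at h
      by_cases hf : isPosibleA c info n = true
      · simp only [hf, if_true] at h
        injection h with h; exact h ▸ List.mem_cons_self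
      · simp only [hf, if_false] at h
        exact absurd h (by simp)
    | some b' =>
      rw [hb] at h
      dsimp only at h
      split_ifs at h with hcond
      · injection h with h; exact h ▸ List.mem_cons_self
      · injection h with h; exact h ▸ List.mem_cons_of_mem _ (ih hb)

theorem bestR_none {n : Int} {info : List Int} :
    ∀ {l : List (List Int)}, bestR n info l = none → ∀ c ∈ l, ¬ isPosibleA c info n = true := by
  intro l
  induction l with
  | nil => intro _ c hc; simp at hc
  | cons c t ih =>
    intro h x hx
    unfold bestR at h
    cases hb : bestR n info t with
    | none =>
      rw [hb] at h
      dsimp only at h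
      by_cases hf : isPosibleA c info n = true
      · simp [hf] at h
      · rcases List.mem_cons.mp hx with rfl | hx2
        · exact hf
        · exact ih hb x hx2
    | some b' =>
      rw [hb] at h
      dsimp only at h
      split_ifs at h <;> simp at h

theorem bestR_feas {n : Int} {info : List Int} :
    ∀ {l : List (List Int)} {b : List Int}, bestR n info l = some b → isPosibleA b info n = true := by
  intro l
  induction l with
  | nil => intro b h; simp [bestR] at h
  | cons c t ih =>
    intro b h
    unfold bestR at h
    cases hb : bestR n info t with
    | none =>
      rw [hb] at h
      dsimp only at h
      by_cases hf : isPosibleA c info n = true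
      · simp only [hf, if_true] at h; injection h with h; exact h ▸ hf
      · simp [hf] at h
    | some b' =>
      rw [hb] at h
      dsimp only at h
      split_ifs at h with hcond
      · injection h with h; exact h ▸ hcond.1
      · injection h with h; exact h ▸ ih hb

theorem bestR_max {n : Int} {info : List Int} :
    ∀ {l : List (List Int)}, l.Pairwise (fun a b => lexA a b = true) →
      ∀ {b : List Int}, bestR n info l = some b →
      ∀ c ∈ l, isPosibleA c info n = true →
        calcScoreA c info < calcScoreA b info ∨
          (calcScoreA c info = calcScoreA b info ∧ (c = b ∨ lexA b c = true)) := by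
  intro l
  induction l with
  | nil => intro _ b h; simp [bestR] at h
  | cons c t ih =>
    intro hp b h x hx hxf
    obtain ⟨hhead, hptail⟩ := List.pairwise_cons.mp hp
    unfold bestR at h
    cases hb : bestR n info t with
    | none =>
      rw [hb] at h
      dsimp only at h
      by_cases hf : isPosibleA c info n = true
      · simp only [hf, if_true] at h
        injection h with h
        rcases List.mem_cons.mp hx with rfl | hx2
        · right; exact ⟨h ▸ rfl, Or.inl h⟩
        · exact absurd hxf (bestR_none hb x hx2)
      · simp [hf] at h
    | some b' =>
      rw [hb] at h
      dsimp only at h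
      have hcb' : lexA c b' = true := hhead b' (bestR_mem hb)
      split_ifs at h with hcond
      · -- winner is c
        injection h with h; subst h
        rcases List.mem_cons.mp hx with rfl | hx2
        · right; exact ⟨rfl, Or.inl rfl⟩
        · have hxb' := ih hptail hb x hx2 hxf
          rcases hcond.2 with hlt | ⟨heq, hkey⟩
          · rcases hxb' with h1 | ⟨h2, _⟩ <;> [left; left] <;> omega
          · rcases hxb' with h1 | ⟨h2, h3⟩
            · left; omega
            · right
              refine ⟨by omega, Or.inr ?_⟩
              rcases h3 with rfl | h3
              · exact hkey
              · exact lexA_trans _ _ _ hkey h3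
      · -- winner is b'
        injection h with h; subst h
        rcases List.mem_cons.mp hx with rfl | hx2
        · -- x = c is not better than b': since lexA c b', its score must be smaller
          push_neg at hcond
          obtain ⟨hle, himp⟩ := hcond hxf
          by_cases heq : calcScoreA x info = calcScoreA b' info
          · exact absurd hcb' (himp heq)
          · left; omega
        · exact ih hptail hb x hx2 hxf

theorem foldA_char (n : Int) (info : List Int) :
    ∀ (l : List (List Int)), l.Pairwise (fun a b => lexA a b = true) →
      ∀ ans mv,
        l.foldl
          (fun (st : List Int × Int) c =>
            if isPosibleA c info n then
              let s := calcScoreA c info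
              if s > st.2 then (c, s) else st
            else st) (ans, mv) =
          match bestR n info l with
          | none => (ans, mv)
          | some b => if calcScoreA b info > mv then (b, calcScoreA b info) else (ans, mv) := by
  intro l
  induction l with
  | nil => intro _ ans mv; simp [bestR]
  | cons c t ih =>
    intro hp ans mv
    obtain ⟨hhead, hptail⟩ := List.pairwise_cons.mp hp
    simp only [List.foldl_cons]
    simp only [bestR]
    by_cases hf : isPosibleA c info n = true
    · by_cases hgt : calcScoreA c info > mv
      · rw [if_pos hf, if_pos hgt, ih hptail]
        cases hb : bestR n info t with
        | none => simp [hf, hgt]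
        | some b' =>
          have hkb' : lexA c b' = true := hhead b' (bestR_mem hb)
          dsimp only
          by_cases hsb : calcScoreA b' info > calcScoreA c info
          · have hcneg : ¬(isPosibleA c info n = true ∧ (calcScoreA c info > calcScoreA b' info ∨
                (calcScoreA c info = calcScoreA b' info ∧ lexA c b' = true))) := by
              intro h; rcases h.2 with h1 | ⟨h1, _⟩ <;> omega
            rw [if_pos hsb, if_neg hcneg]
            dsimp only
            rw [if_pos (show calcScoreA b' info > mv by omega)]
          · have hcpos : isPosibleA c info n = true ∧ (calcScoreA c info > calcScoreA b' info ∨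
                (calcScoreA c info = calcScoreA b' info ∧ lexA c b' = true)) := by
              refine ⟨hf, ?_⟩
              by_cases heq : calcScoreA c info = calcScoreA b' info
              · exact Or.inr ⟨heq, hkb'⟩
              · exact Or.inl (by omega)
            rw [if_neg hsb, if_pos hcpos]
            dsimp only
            rw [if_pos hgt]
      · rw [if_pos hf, if_neg hgt, ih hptail]
        cases hb : bestR n info t with
        | none => simp [hf, hgt]
        | some b' =>
          have hkb' : lexA c b' = true := hhead b' (bestR_mem hb)
          dsimp only
          by_cases hsb : calcScoreA b' info > calcScoreA c info
          · have hcneg : ¬(isPosibleA c info n = true ∧ (calcScoreA c info > calcScoreA b' info ∨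
                (calcScoreA c info = calcScoreA b' info ∧ lexA c b' = true))) := by
              intro h; rcases h.2 with h1 | ⟨h1, _⟩ <;> omega
            rw [if_neg hcneg]
          · have hcpos : isPosibleA c info n = true ∧ (calcScoreA c info > calcScoreA b' info ∨
                (calcScoreA c info = calcScoreA b' info ∧ lexA c b' = true)) := by
              refine ⟨hf, ?_⟩
              by_cases heq : calcScoreA c info = calcScoreA b' info
              · exact Or.inr ⟨heq, hkb'⟩
              · exact Or.inl (by omega)
            rw [if_pos hcpos]
            dsimp only
            rw [if_neg hgt, if_neg (show ¬calcScoreA b' info > mv by omega)]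
    · rw [if_neg hf, ih hptail]
      cases hb : bestR n info t with
      | none => simp [hf]
      | some b' =>
        dsimp only
        have hcneg : ¬(isPosibleA c info n = true ∧ (calcScoreA c info > calcScoreA b' info ∨
            (calcScoreA c info = calcScoreA b' info ∧ lexA c b' = true))) := fun h => hf h.1
        rw [if_neg hcneg]

-- ---- B-side fold characterization ----
theorem inner_gen (info : List Int) (m : Int) :
    ∀ (l : List Int) (a b : Int),
      l.foldl
        (fun (t : Int × Int) i =>
          if PySem.Int.mod (PySem.Int.floordiv m (2 ^ i.toNat)) 2 = 1 then
            (t.1 + ((PySem.List.pyGet? info i).getD 0 + 1), t.2 + (10 - i))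
          else if (PySem.List.pyGet? info i).getD 0 ≠ 0 then (t.1, t.2 - (10 - i))
          else t) (a, b) =
        (a + ((l.filter (bitP m)).map (fun i => (PySem.List.pyGet? info i).getD 0 + 1)).sum,
         b + (l.map (termS info m)).sum) := by
  intro l
  induction l with
  | nil => intro a b; simp
  | cons i t ih =>
    intro a b
    simp only [List.foldl_cons, List.filter_cons, List.map_cons, List.sum_cons]
    by_cases h1 : PySem.Int.mod (PySem.Int.floordiv m (2 ^ i.toNat)) 2 = 1
    · have hb1 : bitP m i = true := decide_eq_true h1
      have ht : termS info m i = 10 - i := by unfold termS; rw [if_pos hb1]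
      rw [if_pos h1, hb1, ih, ht]
      simp only [if_true, List.map_cons, List.sum_cons, Prod.mk.injEq]
      constructor <;> omega
    · have hb1 : bitP m i = false := by unfold bitP; exact decide_eq_false h1
      rw [if_neg h1, hb1]
      simp only [Bool.false_eq_true, if_false]
      by_cases h2 : (PySem.List.pyGet? info i).getD 0 ≠ 0
      · have ht : termS info m i = -(10 - i) := by
          unfold termS
          rw [hb1]
          simp only [Bool.false_eq_true, if_false]
          exact if_pos h2
        rw [if_pos h2, ih, ht]
        simp only [Prod.mk.injEq]
        exact ⟨trivial, by omega⟩
      · have ht : termS info m i = 0 := by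
          unfold termS
          rw [hb1]
          simp only [Bool.false_eq_true, if_false]
          exact if_neg h2
        rw [if_neg h2, ih, ht]
        simp only [Prod.mk.injEq]
        exact ⟨trivial, by omega⟩

theorem innerB_eq (info : List Int) (m : Int) :
    innerB info m = (costM info m, scoreM info m) := by
  unfold innerB costM scoreM l1r
  rw [inner_gen info m (PySem.List.pyRange 0 11 1) 0 0]
  simp only [zero_add]

theorem stepB_eq (n : Int) (info : List Int) (acc : Option (Int × Int)) (m : Int) :
    stepB n info acc m =
      if costM info m ≤ n ∧ scoreM info m > thr acc then some (scoreM info m, m) else acc := by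
  unfold stepB
  rw [innerB_eq]
  cases acc <;> rfl

theorem bestM_mem {n : Int} {info : List Int} :
    ∀ {l : List Int} {b : Int}, bestM n info l = some b → b ∈ l := by
  intro l
  induction l with
  | nil => intro b h; simp [bestM] at h
  | cons c t ih =>
    intro b h
    unfold bestM at h
    cases hb : bestM n info t with
    | none =>
      rw [hb] at h
      dsimp only at h
      by_cases hf : costM info c ≤ n
      · rw [if_pos hf] at h
        injection h with h; exact h ▸ List.mem_cons_self
      · rw [if_neg hf] at h
        exact absurd h (by simp)
    | some b' =>
      rw [hb] at h
      dsimp only at h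
      split_ifs at h with hcond
      · injection h with h; exact h ▸ List.mem_cons_self
      · injection h with h; exact h ▸ List.mem_cons_of_mem _ (ih hb)

theorem bestM_none {n : Int} {info : List Int} :
    ∀ {l : List Int}, bestM n info l = none → ∀ m ∈ l, ¬ costM info m ≤ n := by
  intro l
  induction l with
  | nil => intro _ m hm; simp at hm
  | cons c t ih =>
    intro h x hx
    unfold bestM at h
    cases hb : bestM n info t with
    | none =>
      rw [hb] at h
      dsimp only at h
      by_cases hf : costM info c ≤ n
      · simp [hf] at h
      · rcases List.mem_cons.mp hx with rfl | hx2
        · exact hf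
        · exact ih hb x hx2
    | some b' =>
      rw [hb] at h
      dsimp only at h
      split_ifs at h <;> simp at h

theorem bestM_feas {n : Int} {info : List Int} :
    ∀ {l : List Int} {b : Int}, bestM n info l = some b → costM info b ≤ n := by
  intro l
  induction l with
  | nil => intro b h; simp [bestM] at h
  | cons c t ih =>
    intro b h
    unfold bestM at h
    cases hb : bestM n info t with
    | none =>
      rw [hb] at h
      dsimp only at h
      by_cases hf : costM info c ≤ n
      · rw [if_pos hf] at h; injection h with h; exact h ▸ hf
      · simp [hf] at h
    | some b' =>
      rw [hb] at h
      dsimp only at h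
      split_ifs at h with hcond
      · injection h with h; exact h ▸ hcond.1
      · injection h with h; exact h ▸ ih hb

theorem bestM_max {n : Int} {info : List Int} :
    ∀ {l : List Int} {b : Int}, bestM n info l = some b →
      ∀ m ∈ l, costM info m ≤ n →
        scoreM info m < scoreM info b ∨ (scoreM info m = scoreM info b ∧ m ≤ b) := by
  intro l
  induction l with
  | nil => intro b h; simp [bestM] at h
  | cons c t ih =>
    intro b h x hx hxf
    unfold bestM at h
    cases hb : bestM n info t with
    | none =>
      rw [hb] at h
      dsimp only at h
      by_cases hf : costM info c ≤ n
      · rw [if_pos hf] at h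
        injection h with h
        rcases List.mem_cons.mp hx with rfl | hx2
        · right; exact ⟨h ▸ rfl, h ▸ le_refl _⟩
        · exact absurd hxf (bestM_none hb x hx2)
      · simp [hf] at h
    | some b' =>
      rw [hb] at h
      dsimp only at h
      split_ifs at h with hcond
      · injection h with h; subst h
        rcases List.mem_cons.mp hx with rfl | hx2
        · right; exact ⟨rfl, le_refl _⟩
        · have hxb' := ih hb x hx2 hxf
          rcases hcond.2 with hlt | ⟨heq, hkey⟩
          · rcases hxb' with h1 | ⟨h2, h3⟩ <;> [left; left] <;> omega
          · rcases hxb' with h1 | ⟨h2, h3⟩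
            · left; omega
            · right; constructor <;> omega
      · injection h with h; subst h
        rcases List.mem_cons.mp hx with rfl | hx2
        · push_neg at hcond
          obtain ⟨hle, himp⟩ := hcond hxf
          by_cases heq : scoreM info x = scoreM info b'
          · right; exact ⟨heq, himp heq⟩
          · left; omega
        · exact ih hb x hx2 hxf

theorem thr_some (p : Int × Int) : thr (some p) = p.1 := rfl

theorem foldB_char (n : Int) (info : List Int) :
    ∀ (ms : List Int), ms.Pairwise (· > ·) → ∀ (acc : Option (Int × Int)),
      ms.foldl (stepB n info) acc =
        match bestM n info ms with
        | none => acc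
        | some m => if scoreM info m > thr acc then some (scoreM info m, m) else acc := by
  intro ms
  induction ms with
  | nil => intro _ acc; simp [bestM]
  | cons m t ih =>
    intro hp acc
    obtain ⟨hhead, hptail⟩ := List.pairwise_cons.mp hp
    simp only [List.foldl_cons]
    rw [ih hptail (stepB n info acc m)]
    simp only [bestM]
    by_cases hf : costM info m ≤ n
    · by_cases hgt : scoreM info m > thr acc
      · have hstep : stepB n info acc m = some (scoreM info m, m) := by
          rw [stepB_eq, if_pos ⟨hf, hgt⟩]
        cases hb : bestM n info t with
        | none =>
          simp only [hstep, if_pos hf, thr_some]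
          rw [if_pos hgt]
        | some b' =>
          have hkb' : m > b' := hhead b' (bestM_mem hb)
          by_cases hsb : scoreM info b' > scoreM info m
          · have hcneg : ¬(costM info m ≤ n ∧ (scoreM info m > scoreM info b' ∨
                (scoreM info m = scoreM info b' ∧ m > b'))) := by
              intro h; rcases h.2 with h1 | ⟨h1, _⟩ <;> omega
            simp only [hstep, if_neg hcneg, thr_some]
            rw [if_pos hsb, if_pos (show scoreM info b' > thr acc by omega)]
          · have hcpos : costM info m ≤ n ∧ (scoreM info m > scoreM info b' ∨
                (scoreM info m = scoreM info b' ∧ m > b')) := by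
              refine ⟨hf, ?_⟩
              by_cases heq : scoreM info m = scoreM info b'
              · exact Or.inr ⟨heq, hkb'⟩
              · exact Or.inl (by omega)
            simp only [hstep, if_pos hcpos, thr_some]
            rw [if_neg hsb, if_pos hgt]
      · have hstep : stepB n info acc m = acc := by
          rw [stepB_eq, if_neg (by tauto)]
        cases hb : bestM n info t with
        | none =>
          simp only [hstep, if_pos hf]
          rw [if_neg hgt]
        | some b' =>
          have hkb' : m > b' := hhead b' (bestM_mem hb)
          by_cases hsb : scoreM info b' > scoreM info m
          · have hcneg : ¬(costM info m ≤ n ∧ (scoreM info m > scoreM info b' ∨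
                (scoreM info m = scoreM info b' ∧ m > b'))) := by
              intro h; rcases h.2 with h1 | ⟨h1, _⟩ <;> omega
            simp only [hstep, if_neg hcneg]
          · have hcpos : costM info m ≤ n ∧ (scoreM info m > scoreM info b' ∨
                (scoreM info m = scoreM info b' ∧ m > b')) := by
              refine ⟨hf, ?_⟩
              by_cases heq : scoreM info m = scoreM info b'
              · exact Or.inr ⟨heq, hkb'⟩
              · exact Or.inl (by omega)
            simp only [hstep, if_pos hcpos]
            rw [if_neg (show ¬ scoreM info b' > thr acc by omega), if_neg hgt]
    · have hstep : stepB n info acc m = acc := by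
        rw [stepB_eq, if_neg (by tauto)]
      cases hb : bestM n info t with
      | none =>
        simp only [hstep, if_neg hf]
      | some b' =>
        have hcneg : ¬(costM info m ≤ n ∧ (scoreM info m > scoreM info b' ∨
            (scoreM info m = scoreM info b' ∧ m > b'))) := fun h => hf h.1
        simp only [hstep, if_neg hcneg]


-- ---- scores and costs as sums; list/mask correspondences ----
theorem containsIff (l : List Int) (x : Int) : l.contains x = true ↔ x ∈ l := by simp

theorem sum_map_sub (f g : Int → Int) : ∀ l : List Int,
    (l.map (fun i => f i - g i)).sum = (l.map f).sum - (l.map g).sum := by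
  intro l
  induction l with
  | nil => simp
  | cons i t ih => simp only [List.map_cons, List.sum_cons, ih]; ring

theorem sum_nonpos_list : ∀ l : List Int, (∀ x ∈ l, x ≤ 0) → l.sum ≤ 0 := by
  intro l
  induction l with
  | nil => intro _; simp
  | cons y t ih =>
    intro h
    rw [List.sum_cons]
    have h1 := h y List.mem_cons_self
    have h2 := ih (fun x hx => h x (List.mem_cons_of_mem _ hx))
    omega

theorem sum_nonneg_all_zero : ∀ l : List Int, (∀ x ∈ l, 0 ≤ x) → l.sum = 0 → ∀ x ∈ l, x = 0 := by
  intro l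
  induction l with
  | nil => intro _ _ x hx; simp at hx
  | cons y t ih =>
    intro hpos hsum x hx
    rw [List.sum_cons] at hsum
    have h1 := hpos y List.mem_cons_self
    have h2 : 0 ≤ t.sum := sum_nonneg_list t (fun z hz => hpos z (List.mem_cons_of_mem _ hz))
    rcases List.mem_cons.mp hx with rfl | hx2
    · omega
    · exact ih (fun z hz => hpos z (List.mem_cons_of_mem _ hz)) (by omega) x hx2

theorem calc_fold (c : List Int) (info : List Int) :
    ∀ (l : List Int) (s0 : Int),
      l.foldl
        (fun s i =>
          if c.contains i then s + (10 - i)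
          else if (PySem.List.pyGet? info i).getD 0 ≠ 0 then s - (10 - i)
          else s) s0 =
        s0 + (l.map (fC c info)).sum := by
  intro l
  induction l with
  | nil => intro s0; simp
  | cons i t ih =>
    intro s0
    simp only [List.foldl_cons, List.map_cons, List.sum_cons]
    by_cases h1 : c.contains i = true
    · rw [if_pos h1, ih]
      have : fC c info i = 10 - i := by unfold fC; rw [if_pos h1]
      rw [this]; ring
    · rw [if_neg h1]
      by_cases h2 : (PySem.List.pyGet? info i).getD 0 ≠ 0
      · rw [if_pos h2, ih]
        have : fC c info i = -(10 - i) := by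
          unfold fC
          rw [if_neg h1]
          exact if_pos h2
        rw [this]; ring
      · rw [if_neg h2, ih]
        have : fC c info i = 0 := by
          unfold fC
          rw [if_neg h1]
          exact if_neg h2
        rw [this]; ring

theorem calcScore_sum (c : List Int) (info : List Int) :
    calcScoreA c info = (l1r.map (fC c info)).sum := by
  unfold calcScoreA
  rw [calc_fold c info (PySem.List.pyRange 0 11 1) 0, zero_add]
  rfl

theorem contains_cs (m i : Int) (hi : i ∈ l1r) : (csList m).contains i = bitP m i := by
  have hmem : i ∈ l0r := by rw [l0r_eq_rev, List.mem_reverse]; exact hi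
  cases h : bitP m i with
  | true =>
    have : i ∈ csList m := List.mem_filter.mpr ⟨hmem, h⟩
    simpa using this
  | false =>
    have : i ∉ csList m := by
      intro hmemf
      have := (List.mem_filter.mp hmemf).2
      rw [h] at this
      exact Bool.false_ne_true this
    simpa using this

theorem sc_cs (info : List Int) (m : Int) : calcScoreA (csList m) info = scoreM info m := by
  rw [calcScore_sum]
  unfold scoreM
  congr 1
  apply List.map_congr_left
  intro i hi
  have hc := contains_cs m i hi
  unfold fC termS
  rw [hc]

theorem csList_rev (m : Int) : csList m = (l1r.filter (bitP m)).reverse := by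
  unfold csList
  rw [l0r_eq_rev, List.filter_reverse]

theorem cost_cs (info : List Int) (m : Int) :
    ((csList m).map (fun i => (PySem.List.pyGet? info i).getD 0 + 1)).sum = costM info m := by
  rw [csList_rev, List.map_reverse, List.sum_reverse]
  rfl

theorem isPos_cs (info : List Int) (n m : Int) :
    isPosibleA (csList m) info n = true ↔ costM info m ≤ n := by
  unfold isPosibleA
  rw [foldl_add_map (fun i => (PySem.List.pyGet? info i).getD 0 + 1) (csList m) 0, zero_add,
    cost_cs]
  simp

theorem LA_descOK {c : List Int} (hc : c ∈ getSubsetA) : descOK c = true :=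
  List.all_eq_true.mp F_desc c hc

theorem cs_mask_id {c : List Int} (hc : c ∈ getSubsetA) :
    csList (maskOf c) = c ∧ 0 ≤ maskOf c ∧ maskOf c < 2048 := by
  have h := List.all_eq_true.mp F_csmask c hc
  simp only [Bool.and_eq_true, beq_iff_eq, decide_eq_true_eq] at h
  exact ⟨h.1, h.2.1, h.2.2⟩

theorem nodup_LA : getSubsetA.Nodup :=
  pairwise_lex_LA.imp (fun {a b} h => by
    intro heq
    subst heq
    rw [lexA_irrefl] at h
    exact Bool.false_ne_true h)

theorem mask_cover {m : Int} (hm : m ∈ PySem.List.pyRange 0 2048 1) : csList m ∈ getSubsetA := by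
  have hsub : ∀ x ∈ getSubsetA.map maskOf, x ∈ PySem.List.pyRange 0 2048 1 := by
    intro x hx
    obtain ⟨c, hc, rfl⟩ := List.mem_map.mp hx
    obtain ⟨_, h0, h2⟩ := cs_mask_id hc
    exact (PySem.List.mem_pyRange_one).mpr ⟨h0, h2⟩
  have hnd : (getSubsetA.map maskOf).Nodup :=
    List.Nodup.map_on (fun x hx y hy hxy => by
      have h1 := (cs_mask_id hx).1
      have h2 := (cs_mask_id hy).1
      rw [← h1, ← h2, hxy]) nodup_LA
  have hsp : List.Subperm (getSubsetA.map maskOf) (PySem.List.pyRange 0 2048 1) :=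
    List.subperm_of_subset hnd hsub
  have hlen : (PySem.List.pyRange 0 2048 1).length ≤ (getSubsetA.map maskOf).length := by
    rw [List.length_map, F_len, PySem.List.length_pyRange_one]
    decide
  have hperm := hsp.perm_of_length_le hlen
  have hm' : m ∈ getSubsetA.map maskOf := hperm.mem_iff.mpr hm
  obtain ⟨c, hc, hcm⟩ := List.mem_map.mp hm'
  rw [← hcm, (cs_mask_id hc).1]
  exact hc

theorem maskcs_id {m : Int} (hm : m ∈ PySem.List.pyRange 0 2048 1) : maskOf (csList m) = m := by
  have := List.all_eq_true.mp F_maskcs m hm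
  simpa using this

theorem mem_mlist {m : Int} : m ∈ mlist ↔ 0 ≤ m ∧ m < 2048 := by
  rw [F_mrev, List.mem_reverse, PySem.List.mem_pyRange_one]

theorem sc_nil_nonpos (info : List Int) : calcScoreA [] info ≤ 0 := by
  rw [calcScore_sum]
  have hb : ∀ x ∈ l1r.map (fC ([] : List Int) info), x ≤ 0 := by
    intro x hx
    obtain ⟨i, hi, rfl⟩ := List.mem_map.mp hx
    obtain ⟨h0, h11⟩ := (PySem.List.mem_pyRange_one).mp hi
    unfold fC
    rw [if_neg (by simp)]
    by_cases h2 : (PySem.List.pyGet? info i).getD 0 ≠ 0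
    · rw [if_pos h2]; omega
    · rw [if_neg h2]
  exact sum_nonpos_list _ hb

-- two strictly descending lists with the same members are equal
theorem desc_ext {c1 c2 : List Int} (h1 : c1.Pairwise (· > ·)) (h2 : c2.Pairwise (· > ·))
    (hm : ∀ x, x ∈ c1 ↔ x ∈ c2) : c1 = c2 := by
  haveI : IsAntisymm Int (· > ·) := ⟨fun a b hab hba => absurd hab (lt_asymm hba)⟩
  have hn1 : c1.Nodup := h1.imp (fun {a b} h => by omega)
  have hn2 : c2.Nodup := h2.imp (fun {a b} h => by omega)
  have hperm : c1.Perm c2 := (List.perm_ext_iff_of_nodup hn1 hn2).mpr hm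
  exact List.Perm.eq_of_pairwise (fun a b _ _ hab hba => absurd hab (lt_asymm hba)) h1 h2 hperm

-- a score-preserving superset can only add ring 10
theorem subset_score_eq (info : List Int) {c1 c2 : List Int} (h1 : descOK c1 = true)
    (h2 : descOK c2 = true) (hsub : ∀ x ∈ c1, x ∈ c2)
    (hsc : calcScoreA c1 info = calcScoreA c2 info) :
    ∀ x ∈ c2, x ∈ c1 ∨ x = 10 := by
  have hnn : ∀ i ∈ l1r, 0 ≤ fC c2 info i - fC c1 info i := by
    intro i hi
    obtain ⟨hi0, hi11⟩ := (PySem.List.mem_pyRange_one).mp hi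
    unfold fC
    by_cases hin1 : c1.contains i = true
    · have hin2 : c2.contains i = true := by
        rw [containsIff] at hin1 ⊢
        exact hsub i hin1
      rw [if_pos hin1, if_pos hin2]
      omega
    · rw [if_neg hin1]
      by_cases hin2 : c2.contains i = true
      · rw [if_pos hin2]
        by_cases hz : (PySem.List.pyGet? info i).getD 0 ≠ 0
        · rw [if_pos hz]; omega
        · rw [if_neg hz]; omega
      · rw [if_neg hin2]
        by_cases hz : (PySem.List.pyGet? info i).getD 0 ≠ 0
        · rw [if_pos hz]; omega
        · rw [if_neg hz]; omega
  have hsum0 : (l1r.map (fun i => fC c2 info i - fC c1 info i)).sum = 0 := by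
    rw [sum_map_sub, ← calcScore_sum, ← calcScore_sum, hsc]
    omega
  have hzero : ∀ i ∈ l1r, fC c2 info i - fC c1 info i = 0 := by
    intro i hi
    exact sum_nonneg_all_zero _
      (by
        intro x hx
        obtain ⟨j, hj, rfl⟩ := List.mem_map.mp hx
        exact hnn j hj) hsum0 _ (List.mem_map.mpr ⟨i, hi, rfl⟩)
  intro x hx
  by_cases hx1 : x ∈ c1
  · exact Or.inl hx1
  · right
    have hb := descOK_bounds c2 h2 x hx
    have hxl : x ∈ l1r := (PySem.List.mem_pyRange_one).mpr ⟨hb.1, by omega⟩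
    have hz := hzero x hxl
    have hc2 : c2.contains x = true := (containsIff _ _).mpr hx
    have hc1 : ¬ c1.contains x = true := fun h => hx1 ((containsIff _ _).mp h)
    unfold fC at hz
    rw [if_pos hc2, if_neg hc1] at hz
    split_ifs at hz <;> omega

theorem sum_map_ite (p : Int → Bool) (f : Int → Int) : ∀ l : List Int,
    (l.map (fun i => if p i then f i else 0)).sum = ((l.filter p).map f).sum := by
  intro l
  induction l with
  | nil => simp
  | cons i t ih =>
    simp only [List.map_cons, List.sum_cons, List.filter_cons]
    cases h : p i with
    | true => simp only [if_true, List.map_cons, List.sum_cons, ih]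
    | false => simp only [Bool.false_eq_true, if_false, ih]; omega

theorem dropLast_getLastD : ∀ (t : List Int) (a : Int),
    (a :: t).dropLast ++ [(a :: t).getLastD 0] = a :: t := by
  intro t
  induction t with
  | nil => intro a; rfl
  | cons b t2 ih =>
    intro a
    have h := ih b
    simp only [List.getLastD_cons] at h ⊢
    simp only [List.dropLast_cons₂, List.cons_append]
    exact congrArg (a :: ·) h

-- ===== VERDICT (by name: the statement is the Claim_ definition above) =====
theorem solution_spec : Claim_equal_solution := by
  unfold Claim_equal_solution Spec_solution
  intro n info _ _
  unfold solution solution_alt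
  rw [foldA_char n info getSubsetA pairwise_lex_LA [] (-1)]
  rw [foldB_char n info (PySem.List.pyRange 2047 (-1) (-1)) pairwise_gt_mlist none]
  cases hbr : bestR n info getSubsetA with
  | none =>
    cases hbm : bestM n info (PySem.List.pyRange 2047 (-1) (-1)) with
    | none =>
      dsimp only
      rw [if_pos (show ([] : List Int).length = 0 ∨ (-1 : Int) = 0 from Or.inl rfl)]
    | some mB =>
      exfalso
      have hmBml : mB ∈ mlist := bestM_mem hbm
      obtain ⟨hmB0, hmB2⟩ := mem_mlist.mp hmBml
      have hmBrange : mB ∈ PySem.List.pyRange 0 2048 1 :=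
        (PySem.List.mem_pyRange_one).mpr ⟨hmB0, hmB2⟩
      have hcs := mask_cover hmBrange
      exact bestR_none hbr _ hcs ((isPos_cs info n mB).mpr (bestM_feas hbm))
  | some bL =>
    have hfeasL := bestR_feas hbr
    have hbLmem := bestR_mem hbr
    have hdescL := LA_descOK hbLmem
    obtain ⟨hcsid, hm0, hm2048⟩ := cs_mask_id hbLmem
    have hm0ml : maskOf bL ∈ mlist := mem_mlist.mpr ⟨hm0, hm2048⟩
    have hfeasM0 : costM info (maskOf bL) ≤ n :=
      (isPos_cs info n (maskOf bL)).mp (by rw [hcsid]; exact hfeasL)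
    have hscM0 : scoreM info (maskOf bL) = calcScoreA bL info := by
      rw [← sc_cs info (maskOf bL), hcsid]
    cases hbm : bestM n info (PySem.List.pyRange 2047 (-1) (-1)) with
    | none => exact absurd hfeasM0 (bestM_none hbm _ hm0ml)
    | some mB =>
      have hmBml : mB ∈ mlist := bestM_mem hbm
      obtain ⟨hmB0, hmB2⟩ := mem_mlist.mp hmBml
      have hmBrange : mB ∈ PySem.List.pyRange 0 2048 1 :=
        (PySem.List.mem_pyRange_one).mpr ⟨hmB0, hmB2⟩
      have hcsB := mask_cover hmBrange
      have hdescB := LA_descOK hcsB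
      have hfeasB : isPosibleA (csList mB) info n = true :=
        (isPos_cs info n mB).mpr (bestM_feas hbm)
      have hscB : scoreM info mB = calcScoreA (csList mB) info := (sc_cs info mB).symm
      have h1 := bestR_max pairwise_lex_LA hbr (csList mB) hcsB hfeasB
      have h2 := bestM_max hbm (maskOf bL) hm0ml hfeasM0
      have hsEq : scoreM info mB = calcScoreA bL info := by
        rcases h1 with ha | ⟨ha, _⟩ <;> rcases h2 with hb2 | ⟨hb2, _⟩ <;> omega
      dsimp only
      by_cases hM : calcScoreA bL info > -1
      · rw [if_pos hM]
        dsimp only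
        by_cases hM0 : calcScoreA bL info = 0
        · rw [if_pos (Or.inr hM0),
            if_neg (show ¬ scoreM info mB > thr none by simp only [thr]; omega)]
        · have hbLnil : bL ≠ [] := by
            intro h
            rw [h] at hM hM0
            have := sc_nil_nonpos info
            omega
          rw [if_neg (show ¬(bL.length = 0 ∨ calcScoreA bL info = 0) by
              push_neg
              exact ⟨fun h => hbLnil (List.length_eq_zero_iff.mp h), hM0⟩),
            if_pos (show scoreM info mB > thr none by simp only [thr]; omega)]
          dsimp only
          -- on a strictly positive tie the two tie-breaking orders agree
          have heqc : csList mB = bL := by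
            by_contra hne
            have hlex : lexA bL (csList mB) = true := by
              rcases h1 with ha | ⟨_, hc⟩
              · exact absurd ha (by omega)
              · rcases hc with hceq | hlex2
                · exact absurd hceq hne
                · exact hlex2
            have hm0ne : maskOf bL ≠ mB := by
              intro h
              apply hne
              rw [← h, hcsid]
            have hmlt : maskOf bL < mB := by
              rcases h2 with hb2 | ⟨_, hble⟩
              · exact absurd hb2 (by omega)
              · omega
            rcases lexA_mask bL (csList mB) hdescL hdescB hlex with hsub | hmgt
            · have hd10 := subset_score_eq info hdescL hdescB hsub (by omega)
              by_cases h10bL : (10 : Int) ∈ bL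
              · apply hne
                apply desc_ext (descOK_pairwise _ hdescB) (descOK_pairwise _ hdescL)
                intro x
                constructor
                · intro hx
                  rcases hd10 x hx with hx1 | rfl
                  · exact hx1
                  · exact h10bL
                · exact hsub x
              · by_cases h10B : (10 : Int) ∈ csList mB
                · cases hbLc : bL with
                  | nil => exact absurd hbLc hbLnil
                  | cons hh tt =>
                    have hsorted10 : ((10 : Int) :: bL).Pairwise (· > ·) := by
                      refine List.Pairwise.cons ?_ (descOK_pairwise _ hdescL)
                      intro y hy
                      have hb := descOK_bounds bL hdescL y hy
                      have hy10 : y ≠ 10 := fun h => h10bL (h ▸ hy)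
                      omega
                    have heq10 : csList mB = 10 :: bL := by
                      apply desc_ext (descOK_pairwise _ hdescB) hsorted10
                      intro x
                      constructor
                      · intro hx
                        rcases hd10 x hx with hx1 | rfl
                        · exact List.mem_cons_of_mem _ hx1
                        · exact List.mem_cons_self
                      · intro hx
                        rcases List.mem_cons.mp hx with rfl | hx2
                        · exact h10B
                        · exact hsub x hx2
                    have hhmem : hh ∈ bL := by rw [hbLc]; exact List.mem_cons_self
                    have hhb := descOK_bounds bL hdescL hh hhmem
                    have hh10 : hh ≠ 10 := fun h => h10bL (h ▸ hhmem)
                    rw [heq10, hbLc] at hlex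
                    simp only [lexA, Bool.or_eq_true, Bool.and_eq_true, decide_eq_true_eq,
                      beq_iff_eq] at hlex
                    rcases hlex with h | ⟨h, _⟩ <;> omega
                · apply hne
                  apply desc_ext (descOK_pairwise _ hdescB) (descOK_pairwise _ hdescL)
                  intro x
                  constructor
                  · intro hx
                    rcases hd10 x hx with hx1 | rfl
                    · exact hx1
                    · exact absurd hx h10B
                  · exact hsub x
            · rw [maskcs_id hmBrange] at hmgt
              omega
          have hres : (PySem.List.pyRange 0 11 1).map
              (fun s => if bL.contains s then (PySem.List.pyGet? info s).getD 0 + 1 else 0) =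
              (PySem.List.pyRange 0 11 1).map
              (fun i => if PySem.Int.mod (PySem.Int.floordiv mB (2 ^ i.toNat)) 2 = 1 then
                (PySem.List.pyGet? info i).getD 0 + 1 else 0) := by
            apply List.map_congr_left
            intro i hi
            have hcc : bL.contains i = bitP mB i := by rw [← heqc]; exact contains_cs mB i hi
            by_cases hbit : bitP mB i = true
            · rw [if_pos (show bL.contains i = true by rw [hcc]; exact hbit),
                if_pos (of_decide_eq_true hbit)]
            · rw [if_neg (show ¬ bL.contains i = true from by rw [hcc]; exact fun h => hbit h),
                if_neg (fun h => hbit (decide_eq_true h))]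
          rw [hres]
          have hsum : ((PySem.List.pyRange 0 11 1).map
              (fun i => if PySem.Int.mod (PySem.Int.floordiv mB (2 ^ i.toNat)) 2 = 1 then
                (PySem.List.pyGet? info i).getD 0 + 1 else 0)).sum = costM info mB := by
            have hcongr : (PySem.List.pyRange 0 11 1).map
                (fun i => if PySem.Int.mod (PySem.Int.floordiv mB (2 ^ i.toNat)) 2 = 1 then
                  (PySem.List.pyGet? info i).getD 0 + 1 else 0) =
                (PySem.List.pyRange 0 11 1).map
                (fun i => if bitP mB i then (PySem.List.pyGet? info i).getD 0 + 1 else 0) := by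
              apply List.map_congr_left
              intro i _
              by_cases h : PySem.Int.mod (PySem.Int.floordiv mB (2 ^ i.toNat)) 2 = 1
              · rw [if_pos h, if_pos (show bitP mB i = true from decide_eq_true h)]
              · rw [if_neg h,
                  if_neg (show ¬ bitP mB i = true from fun hb => h (of_decide_eq_true hb))]
            rw [hcongr,
              sum_map_ite (bitP mB) (fun i => (PySem.List.pyGet? info i).getD 0 + 1)
                (PySem.List.pyRange 0 11 1)]
            rfl
          have hle : costM info mB ≤ n := bestM_feas hbm
          by_cases hlt : ((PySem.List.pyRange 0 11 1).map
              (fun i => if PySem.Int.mod (PySem.Int.floordiv mB (2 ^ i.toNat)) 2 = 1 then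
                (PySem.List.pyGet? info i).getD 0 + 1 else 0)).sum < n
          · rw [if_pos hlt]
          · rw [if_neg hlt]
            have h0 : n - ((PySem.List.pyRange 0 11 1).map
                (fun i => if PySem.Int.mod (PySem.Int.floordiv mB (2 ^ i.toNat)) 2 = 1 then
                  (PySem.List.pyGet? info i).getD 0 + 1 else 0)).sum = 0 := by omega
            rw [h0, add_zero]
            rw [PySem.List.pyRange_one_cons (by norm_num : (0 : Int) < 11), List.map_cons]
            exact (dropLast_getLastD _ _).symm
      · rw [if_neg hM]
        dsimp only
        rw [if_pos (show ([] : List Int).length = 0 ∨ (-1 : Int) = 0 from Or.inl rfl),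
          if_neg (show ¬ scoreM info mB > thr none by simp only [thr]; omega)]
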